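-- pv_equiv track=rewrite | github.com/anandvijay96/kp-ai-hr-recruitement-assistant | services/resume_analyzer.py | _find_repeated_phrases
-- ===== SOURCE A (Python) =====
-- from collections import Counter
--
-- def _find_repeated_phrases(text_content: str) -> int:
--     """Find repeated phrases that might indicate template usage"""
--     words = text_content.lower().split()
--     if len(words) < 10:
--         return 0
--
--     # Look for repeated 3-word phrases
--     phrases = [' '.join(words[i:i+3]) for i in range(len(words)-2)]
--     phrase_counts = Counter(phrases)
--
--     # Count phrases that appear more than twice
--     repeated_count = sum(1 for count in phrase_counts.values() if count > 2)
--     return min(repeated_count, 10)  # Cap at 10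
-- ===== SOURCE B (Python) =====
-- def _find_repeated_phrases(text_content: str) -> int:
--     """Sort-then-scan: sort the 3-word phrases and count maximal runs of
--     equal phrases longer than 2, with no hash table / Counter at all."""
--     words = text_content.lower().split()
--     if len(words) < 10:
--         return 0
--
--     phrases = sorted(' '.join(words[i:i + 3]) for i in range(len(words) - 2))
--     repeated = 0
--     i = 0
--     n = len(phrases)
--     while i < n:
--         j = i
--         while j < n and phrases[j] == phrases[i]:
--             j += 1
--         if j - i > 2:
--             repeated += 1
--         i = j
--     return min(repeated, 10)
-- ===== Notes on version B (the rewrite author's own statement) =====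
-- stated objective: alternative
-- what changed: Replaces the Counter hash-table counting plus filtering sum by a sort-then-scan: sort the trigram list and count maximal runs of equal phrases of length > 2, using no dictionary at all.
import Mathlib
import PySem

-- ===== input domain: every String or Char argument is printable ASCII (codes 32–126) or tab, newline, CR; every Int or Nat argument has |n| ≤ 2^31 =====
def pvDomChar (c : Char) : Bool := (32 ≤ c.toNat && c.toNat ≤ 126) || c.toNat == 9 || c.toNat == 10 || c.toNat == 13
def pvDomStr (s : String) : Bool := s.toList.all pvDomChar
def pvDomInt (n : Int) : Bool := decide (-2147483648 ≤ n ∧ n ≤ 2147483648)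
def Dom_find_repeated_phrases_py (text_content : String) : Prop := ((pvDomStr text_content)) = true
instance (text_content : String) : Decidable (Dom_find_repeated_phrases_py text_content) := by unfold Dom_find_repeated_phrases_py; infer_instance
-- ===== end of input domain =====

-- B replaces A's Counter hash-table counting + filtering sum by a sort-then-scan:
-- sort the trigram list and count maximal runs of equal phrases longer than 2 (alternative algorithm).

-- ===== PORT A =====
def find_repeated_phrases_py (text_content : String) : Int :=
  let words := PySem.Str.split₀ (PySem.Str.lower text_content)
  if words.length < 10 then 0
  else
    let phrases := (PySem.List.pyRange 0 ((words.length : Int) - 2) 1).map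
      (fun i => PySem.Str.join " " (PySem.List.slice words (some i) (some (i + 3))))
    let phrase_counts := PySem.Dict.counter phrases
    let repeated_count := phrase_counts.values.foldl
      (fun acc c => if 2 < c then acc + 1 else acc) (0 : Int)
    min repeated_count 10

-- ===== PORT B =====
/-- Source B's outer `while i < n` loop over the sorted list: the inner `while` that
    advances `j` across the current run is the `takeWhile`/`dropWhile` split. -/
def pvRunScan : List String → Int
  | [] => 0
  | x :: xs =>
    (if 2 < ((xs.takeWhile (· == x)).length : Int) + 1 then (1 : Int) else 0)
      + pvRunScan (xs.dropWhile (· == x))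
termination_by l => l.length
decreasing_by
  simp only [List.length_cons]
  exact Nat.lt_succ_of_le (List.length_dropWhile_le _ xs)

def find_repeated_phrases_py_alt (text_content : String) : Int :=
  let words := PySem.Str.split₀ (PySem.Str.lower text_content)
  if words.length < 10 then 0
  else
    let phrases := PySem.List.sorted
      ((PySem.List.pyRange 0 ((words.length : Int) - 2) 1).map
        (fun i => PySem.Str.join " " (PySem.List.slice words (some i) (some (i + 3)))))
      (fun x => x) false
    min (pvRunScan phrases) 10

-- ===== PRECONDITION & SPEC =====
def Spec_find_repeated_phrases_py (text_content : String) (out : Int) : Prop := out = find_repeated_phrases_py_alt text_content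
instance (text_content : String) (out : Int) : Decidable (Spec_find_repeated_phrases_py text_content out) := by unfold Spec_find_repeated_phrases_py; infer_instance

-- ===== CLAIM (what is proved, stated in full; the proofs are below) =====
def Claim_equal_find_repeated_phrases_py : Prop := ∀ (text_content : String), Dom_find_repeated_phrases_py text_content → Spec_find_repeated_phrases_py text_content (find_repeated_phrases_py text_content)

-- ===== LEMMAS AND PROOFS =====

/-- A's filtering sum, peeled off its accumulator: it is `countP (2 < ·)`. -/
lemma pvFoldCount (vs : List Int) : ∀ (a : Int),
    vs.foldl (fun acc c => if 2 < c then acc + 1 else acc) a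
    = a + ((vs.countP (fun c => decide (2 < c)) : Nat) : Int) := by
  induction vs with
  | nil => intro a; simp
  | cons c vs ih =>
    intro a
    simp only [List.foldl_cons, List.countP_cons, ih, decide_eq_true_eq]
    split_ifs with h <;> push_cast <;> ring

/-- A's filtering sum over the Counter's values, as a Finset card. -/
lemma counter_sum_card (l : List String) :
    (PySem.Dict.counter l).values.foldl (fun acc c => if 2 < c then acc + 1 else acc) (0 : Int)
    = ((l.toFinset.filter (fun k => 3 ≤ (l.count k : Int))).card : Int) := by
  have hv : (PySem.Dict.counter l).values = (PySem.Set.ofList l).map (fun k => ((l.count k : Int))) := by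
    simp only [PySem.Dict.values, PySem.Dict.items_counter, List.map_map]
    rfl
  rw [hv, pvFoldCount, List.countP_map]
  have hnd : ((PySem.Set.ofList l : List String)).Nodup := PySem.Set.nodup_ofList l
  have h1 : ((PySem.Set.ofList l : List String).countP
        ((fun c => decide (2 < c)) ∘ (fun k => ((l.count k : Int)))))
      = ((PySem.Set.ofList l : List String).filter
        (fun k => decide (2 < (l.count k : Int)))).length := by
    rw [List.countP_eq_length_filter]
    rfl
  rw [h1]
  have hfn : ((PySem.Set.ofList l : List String).filter
      (fun k => decide (2 < (l.count k : Int)))).Nodup := hnd.filter _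
  rw [← List.toFinset_card_of_nodup hfn]
  have h2 : ((PySem.Set.ofList l : List String).filter
      (fun k => decide (2 < (l.count k : Int)))).toFinset
      = l.toFinset.filter (fun k => 3 ≤ (l.count k : Int)) := by
    ext k
    simp only [List.mem_toFinset, List.mem_filter, Finset.mem_filter,
      PySem.Set.mem_ofList, decide_eq_true_eq]
    constructor
    · rintro ⟨h1, h2⟩; exact ⟨h1, by omega⟩
    · rintro ⟨h1, h2⟩; exact ⟨h1, by omega⟩
  rw [h2]
  ring

/-- A list's `dropWhile` head fails the predicate. -/
lemma pvDropWhileHead {α : Type} (p : α → Bool) : ∀ (l : List α) (y : α) (ys : List α),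
    l.dropWhile p = y :: ys → p y = false := by
  intro l
  induction l with
  | nil => intro y ys h; simp at h
  | cons a l ih =>
    intro y ys h
    by_cases hp : p a = true
    · rw [List.dropWhile_cons_of_pos hp] at h
      exact ih y ys h
    · rw [List.dropWhile_cons_of_neg hp] at h
      cases h
      exact eq_false_of_ne_true hp

/-- On a (weakly) sorted list, the run scan counts the distinct elements
    of multiplicity ≥ 3: each element forms exactly one maximal run. -/
lemma runScan_sorted : ∀ (l : List String), l.Pairwise (· ≤ ·) →
    pvRunScan l = ((l.toFinset.filter (fun k => 3 ≤ (l.count k : Int))).card : Int) := by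
  intro l
  induction l using pvRunScan.induct with
  | case1 => intro _; simp [pvRunScan]
  | case2 x xs ih =>
    intro h
    have hxs : xs.Pairwise (· ≤ ·) := h.of_cons
    have hxle : ∀ y ∈ xs, x ≤ y := (List.pairwise_cons.mp h).1
    set t := xs.takeWhile (· == x) with ht
    set d := xs.dropWhile (· == x) with hd
    have hsplit : t ++ d = xs := List.takeWhile_append_dropWhile
    have htx : ∀ y ∈ t, y = x := by
      intro y hy
      rw [ht] at hy
      exact eq_of_beq (List.mem_takeWhile_imp (p := (· == x)) hy)
    have hdp : d.Pairwise (· ≤ ·) := List.Pairwise.sublist (List.dropWhile_sublist _) hxs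
    -- every element of d is strictly greater than x
    have hxd : ∀ y ∈ d, x < y := by
      cases hdd : d with
      | nil => intro y hy; simp at hy
      | cons z d' =>
        have he : xs.dropWhile (· == x) = z :: d' := by rw [← hd, hdd]
        have hz0 : (z == x) = false := pvDropWhileHead (· == x) xs z d' he
        have hzx : z ≠ x := fun hzz => by simp [hzz] at hz0
        have hzmem : z ∈ xs := by
          rw [← hsplit, hdd]; simp
        have hxz : x < z := lt_of_le_of_ne (hxle z hzmem) (Ne.symm hzx)
        intro y hy
        rcases List.mem_cons.mp hy with rfl | hy'
        · exact hxz
        · have := (List.pairwise_cons.mp (hdd ▸ hdp)).1 y hy'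
          exact lt_of_lt_of_le hxz this
    have hxnotd : x ∉ d := fun hm => lt_irrefl x (hxd x hm)
    -- counts
    have hct : t.count x = t.length := List.count_eq_length.mpr (fun b hb => ((htx b hb).symm ▸ rfl))
    have hcd0 : d.count x = 0 := List.count_eq_zero.mpr hxnotd
    have hcx : (x :: xs).count x = t.length + 1 := by
      rw [List.count_cons_self, ← hsplit, List.count_append, hct, hcd0]
    have hck : ∀ k, k ≠ x → (x :: xs).count k = d.count k := by
      intro k hk
      have hckt : t.count k = 0 := List.count_eq_zero.mpr (fun hm => hk (htx k hm))
      have h1 : (x :: xs).count k = xs.count k := by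
        have hxk : ¬ x = k := fun hxk => hk hxk.symm
        simp [hxk]
      rw [h1, ← hsplit, List.count_append, hckt]
      omega
    -- finsets
    have hfs : (x :: xs).toFinset = insert x d.toFinset := by
      ext k
      simp only [List.toFinset_cons, Finset.mem_insert, List.mem_toFinset, ← hsplit,
        List.mem_append]
      constructor
      · rintro (rfl | hk | hk)
        · exact Or.inl rfl
        · exact Or.inl (htx k hk)
        · exact Or.inr hk
      · rintro (rfl | hk)
        · exact Or.inl rfl
        · exact Or.inr (Or.inr hk)
    have hxnfs : x ∉ d.toFinset := fun hm => hxnotd (List.mem_toFinset.mp hm)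
    -- the recursive call via ih, with counts transported from d to x :: xs
    have hdcard : pvRunScan d = ((d.toFinset.filter
        (fun k => 3 ≤ ((x :: xs).count k : Int))).card : Int) := by
      rw [ih hdp]
      congr 2
      apply Finset.filter_congr
      intro k hk
      have hkx : k ≠ x := fun he => hxnfs (he ▸ hk)
      rw [hck k hkx]
    rw [pvRunScan, ← ht, ← hd, hdcard, hfs, Finset.filter_insert]
    have hcx' : (((x :: xs).count x : Nat) : Int) = (t.length : Int) + 1 := by
      rw [hcx]; push_cast; ring
    by_cases hPx : 3 ≤ (((x :: xs).count x : Nat) : Int)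
    · rw [if_pos hPx, Finset.card_insert_of_notMem
        (fun hm => hxnfs (Finset.mem_of_mem_filter x hm))]
      rw [if_pos (by omega)]
      push_cast; ring
    · rw [if_neg hPx, if_neg (by omega)]
      ring

/-- The two cores agree: hash-count-then-filter equals sort-then-run-scan. -/
lemma core_eq (l : List String) :
    (PySem.Dict.counter l).values.foldl (fun acc c => if 2 < c then acc + 1 else acc) (0 : Int)
    = pvRunScan (PySem.List.sorted l (fun x => x) false) := by
  set s := PySem.List.sorted l (fun x => x) false with hs
  have hperm : s.Perm l := PySem.List.sorted_perm l (fun x => x) false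
  have hpw : s.Pairwise (· ≤ ·) := PySem.List.sorted_pairwise l (fun x => x)
  rw [counter_sum_card, runScan_sorted s hpw]
  congr 2
  have hfs : s.toFinset = l.toFinset := by
    ext k; simp [List.mem_toFinset, hperm.mem_iff]
  rw [hfs]
  apply Finset.filter_congr
  intro k _
  rw [hperm.count_eq]

-- ===== VERDICT (by name: the statement is the Claim_ definition above) =====
theorem find_repeated_phrases_py_spec : Claim_equal_find_repeated_phrases_py := by
  intro t _
  unfold Spec_find_repeated_phrases_py find_repeated_phrases_py find_repeated_phrases_py_alt
  simp only
  split_ifs with h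
  · rfl
  · exact congrArg (fun z => min z 10) (core_eq _)
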